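-- pv_equiv track=rewrite | github.com/clement7903/-DataStructuresAlgorithms---kattis | IT5001/liquid_assets.py | remove_aeiou
-- ===== SOURCE A (Python) =====
-- def remove_aeiou(stringofwords):
--   lst = ['a', 'e', 'i', 'o', 'u']
--   words = stringofwords.split()
--   output = []
--   for word in words:
--     if len(word) == 1:
--       output.append(word)
--     else:
--       final_word = word[0]
--       word_mid = word[1:-1]
--       word_end = word[-1]
--       for char in word_mid:
--         if char not in lst:
--           final_word += char
--       final_word += word_end
--       output.append(final_word)
--   return ' '.join(output)
-- ===== SOURCE B (Python) =====
-- def remove_aeiou(stringofwords):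
--     t = ' '.join(stringofwords.split())
--     padded = ' ' + t + ' '
--     return ''.join(c for p, c, n in zip(padded, t, padded[2:])
--                    if c not in 'aeiou' or p == ' ' or n == ' ')
-- ===== Notes on version B (the rewrite author's own statement) =====
-- stated objective: alternative
-- what changed: Instead of A's per-word loop (first char + accumulator over the middle slice + last char, with a length-1 special case), B first normalises the whitespace by re-joining the split words, pads the result with a space on each side, and makes one global sliding-window zip pass over the whole string, dropping a vowel exactly when both of its neighbours are non-space.
import Mathlib
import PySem

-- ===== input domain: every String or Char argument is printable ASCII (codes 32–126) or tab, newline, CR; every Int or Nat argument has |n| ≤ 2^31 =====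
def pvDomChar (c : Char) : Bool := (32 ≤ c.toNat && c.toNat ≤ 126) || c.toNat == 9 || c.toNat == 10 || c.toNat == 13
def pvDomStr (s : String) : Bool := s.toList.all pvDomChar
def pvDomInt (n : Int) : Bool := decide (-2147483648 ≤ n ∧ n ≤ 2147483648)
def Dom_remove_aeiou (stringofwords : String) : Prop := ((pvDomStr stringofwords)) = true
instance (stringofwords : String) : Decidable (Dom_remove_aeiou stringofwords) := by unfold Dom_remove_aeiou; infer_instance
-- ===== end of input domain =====

-- B normalises the whitespace first (' '.join(s.split())) and then makes ONE sliding-window pass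
-- over the whole normalised string, dropping every vowel whose two neighbours (string padded with
-- spaces) are both non-space — no per-word processing at all; objective: alternative (same cost).

-- ===== PORT A =====
def remove_aeiou (stringofwords : String) : String :=
  let lst : List Char := ['a', 'e', 'i', 'o', 'u']
  let words := PySem.Str.split₀ stringofwords
  let output := words.foldl (fun output word =>
    if PySem.Str.len word = 1 then output ++ [word]
    else
      match PySem.Str.pyGet? word 0, PySem.Str.pyGet? word (-1) with
      | some first, some wordEnd =>
        let finalWord := (PySem.Str.slice word (some 1) (some (-1))).toList.foldl
          (fun acc c => if lst.contains c then acc else acc ++ [c]) [first]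
        output ++ [String.ofList (finalWord ++ [wordEnd])]
      | _, _ => output  -- unreachable: str.split() never yields an empty word (word[0]/word[-1] cannot raise)
  ) []
  PySem.Str.join " " output

-- ===== PORT B =====
def remove_aeiou_alt (stringofwords : String) : String :=
  let t := (PySem.Str.join " " (PySem.Str.split₀ stringofwords)).toList
  let padded := ' ' :: t ++ [' ']
  String.ofList (((padded.zip t).zip (padded.drop 2)).filterMap
    (fun pcn => if !(("aeiou".toList).contains pcn.1.2) || pcn.1.1 == ' ' || pcn.2 == ' '
                then some pcn.1.2 else none))

-- ===== PRECONDITION & SPEC =====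
def Spec_remove_aeiou (stringofwords : String) (out : String) : Prop := out = remove_aeiou_alt stringofwords
instance (stringofwords : String) (out : String) : Decidable (Spec_remove_aeiou stringofwords out) := by unfold Spec_remove_aeiou; infer_instance

-- ===== CLAIM (what is proved, stated in full; the proofs are below) =====
def Claim_equal_remove_aeiou : Prop := ∀ (stringofwords : String), Dom_remove_aeiou stringofwords → Spec_remove_aeiou stringofwords (remove_aeiou stringofwords)

-- ===== LEMMAS AND PROOFS =====

-- the per-character decision of B's sliding window
def keepB (p c n : Char) : Bool := !(("aeiou".toList).contains c) || p == ' ' || n == ' '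

-- recursive reading of B's zip pass: prev char carried along, next char looked up ahead
def goB (prev : Char) : List Char → List Char
  | [] => []
  | c :: cs => (if keepB prev c (cs.headD ' ') then [c] else []) ++ goB c cs

-- one step of B's filterMap is a keepB decision
lemma filterMap_keep_cons (prev c n : Char) (L : List ((Char × Char) × Char)) :
    List.filterMap
      (fun pcn => if !(("aeiou".toList).contains pcn.1.2) || pcn.1.1 == ' ' || pcn.2 == ' '
                  then some pcn.1.2 else none) (((prev, c), n) :: L) =
    (if keepB prev c n then [c] else []) ++ List.filterMap
      (fun pcn => if !(("aeiou".toList).contains pcn.1.2) || pcn.1.1 == ' ' || pcn.2 == ' '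
                  then some pcn.1.2 else none) L := by
  have e : (!(("aeiou".toList).contains c) || prev == ' ' || n == ' ') = keepB prev c n := rfl
  simp only [List.filterMap_cons]
  rw [e]
  rcases Bool.eq_false_or_eq_true (keepB prev c n) with h | h <;> rw [h] <;> simp

-- B's triple-zip filter IS goB
lemma zip_eq_goB (t : List Char) (prev : Char) :
    (((prev :: t ++ [' ']).zip t).zip ((prev :: t ++ [' ']).drop 2)).filterMap
      (fun pcn => if !(("aeiou".toList).contains pcn.1.2) || pcn.1.1 == ' ' || pcn.2 == ' '
                  then some pcn.1.2 else none) = goB prev t := by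
  induction t generalizing prev with
  | nil => simp [goB]
  | cons c cs ih =>
    cases cs with
    | nil => simp [goB, keepB]
    | cons c2 cs2 =>
      have htail := ih (prev := c)
      simp only [List.cons_append, List.zip_cons_cons, List.drop_succ_cons, List.drop_zero] at htail ⊢
      rw [filterMap_keep_cons, htail]
      rfl

-- words produced by str.split() are nonempty and contain no whitespace character
lemma split0_go_good (s cur : List Char) (acc : List (List Char))
    (hcur : ∀ c ∈ cur, PySem.Chars.isspace c = false)
    (hacc : ∀ w ∈ acc, w ≠ [] ∧ ∀ c ∈ w, PySem.Chars.isspace c = false) :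
    ∀ w ∈ PySem.Chars.split₀.go s cur acc, w ≠ [] ∧ ∀ c ∈ w, PySem.Chars.isspace c = false := by
  induction s generalizing cur acc with
  | nil =>
    intro w hw
    by_cases hc : cur.isEmpty
    · simp [PySem.Chars.split₀.go, hc] at hw
      exact hacc w (by simpa using hw)
    · simp [PySem.Chars.split₀.go, hc] at hw
      rcases hw with hw | hw
      · exact hacc w (by simpa using hw)
      · subst hw
        refine ⟨by simpa [List.isEmpty_iff] using hc, ?_⟩
        intro c hcmem; exact hcur c (by simpa using hcmem)
  | cons c rest ih =>
    intro w hw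
    by_cases hs : PySem.Chars.isspace c
    · by_cases hc : cur.isEmpty
      · simp [PySem.Chars.split₀.go, hs, hc] at hw
        exact ih [] acc (by simp) hacc w hw
      · simp [PySem.Chars.split₀.go, hs, hc] at hw
        refine ih [] (cur.reverse :: acc) (by simp) ?_ w hw
        intro v hv
        rcases List.mem_cons.mp hv with hv | hv
        · subst hv
          refine ⟨by simpa [List.isEmpty_iff] using hc, ?_⟩
          intro d hd; exact hcur d (by simpa using hd)
        · exact hacc v hv
    · simp [PySem.Chars.split₀.go, hs] at hw
      refine ih (c :: cur) acc ?_ hacc w hw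
      intro d hd
      rcases List.mem_cons.mp hd with hd | hd
      · subst hd; simpa using hs
      · exact hcur d hd
lemma split0_words_good (s : String) (w : String) (hw : w ∈ PySem.Str.split₀ s) :
    w.toList ≠ [] ∧ ∀ c ∈ w.toList, c ≠ ' ' := by
  have h : w.toList ∈ PySem.Chars.split₀ s.toList := by
    rw [← PySem.Str.split₀_map_toList]
    exact List.mem_map_of_mem hw
  obtain ⟨h1, h2⟩ := split0_go_good s.toList [] [] (by simp) (by simp) w.toList h
  refine ⟨h1, fun c hc hsp => ?_⟩
  have := h2 c hc
  rw [hsp] at this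
  simp [PySem.Chars.isspace] at this

-- goB splits at a space separator
lemma goB_sep (w : List Char) (prev : Char) (t : List Char) (hw : ∀ c ∈ w, c ≠ ' ') :
    goB prev (w ++ ' ' :: t) = goB prev w ++ ' ' :: goB ' ' t := by
  induction w generalizing prev with
  | nil => simp [goB, keepB]
  | cons c cs ih =>
    have hhead : (cs ++ ' ' :: t).headD ' ' = cs.headD ' ' := by cases cs <;> simp
    simp only [List.cons_append, goB, hhead]
    rw [ih c (fun d hd => hw d (List.mem_cons_of_mem c hd))]
    simp
-- in the interior of a word (prev and next never a space) goB is a plain vowel filter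
lemma goB_interior (mid : List Char) (z : Char) (prev : Char)
    (hmid : ∀ c ∈ mid, c ≠ ' ') (hprev : prev ≠ ' ') (hz : z ≠ ' ') :
    goB prev (mid ++ [z]) = mid.filter (fun c => !(("aeiou".toList).contains c)) ++ [z] := by
  induction mid generalizing prev with
  | nil =>
    simp [goB, keepB]
  | cons c cs ih =>
    have hnext : (cs ++ [z]).headD ' ' ≠ ' ' := by
      cases cs with
      | nil => simpa using hz
      | cons c2 cs2 => simpa using hmid c2 (by simp)
    have hc : c ≠ ' ' := hmid c (by simp)
    have h1 : (prev == ' ') = false := by simp [hprev]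
    have h2 : ((cs ++ [z]).headD ' ' == ' ') = false := by
      rw [beq_eq_false_iff_ne]
      exact hnext
    have hkeep : keepB prev c ((cs ++ [z]).headD ' ') = !(("aeiou".toList).contains c) := by
      unfold keepB
      rw [h1, h2]
      simp
    simp only [List.cons_append, goB, hkeep]
    rw [ih c (fun d hd => hmid d (List.mem_cons_of_mem c hd)) hc]
    simp [List.filter_cons]
    split <;> simp
-- goB distributes over the space-joined word list
lemma goB_intercalate (ws : List (List Char))
    (h : ∀ w ∈ ws, ∀ c ∈ w, c ≠ ' ') :
    goB ' ' (List.intercalate [' '] ws) = List.intercalate [' '] (ws.map (goB ' ')) := by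
  induction ws with
  | nil => simp [List.intercalate, goB]
  | cons w rest ih =>
    cases rest with
    | nil => simp [List.intercalate]
    | cons w2 rest2 =>
      have hstep : List.intercalate [' '] (w :: w2 :: rest2) = w ++ ' ' :: List.intercalate [' '] (w2 :: rest2) := by
        simp [List.intercalate]
      have hstep2 : List.intercalate [' '] (goB ' ' w :: (w2 :: rest2).map (goB ' ')) =
          goB ' ' w ++ ' ' :: List.intercalate [' '] ((w2 :: rest2).map (goB ' ')) := by
        simp [List.intercalate]
      rw [hstep, goB_sep w ' ' _ (h w (by simp)), ih (fun v hv => h v (List.mem_cons_of_mem w hv))]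
      simp only [List.map_cons] at hstep2 ⊢
      rw [hstep2]

-- the slice word[1:-1] on a word written as a :: mid ++ [z]
lemma slice_one_neg_one {α : Type} (a z : α) (mid : List α) :
    PySem.List.slice (a :: (mid ++ [z])) (some 1) (some (-1)) = mid := by
  have h : ¬((mid.length : Int) + 1 < 0) := by omega
  simp [PySem.List.slice, PySem.List.clampIdx, h]

-- A's loop body on a nonempty space-free word appends exactly goB ' ' of the word
lemma step_append (output : List String) (word : String)
    (hne : word.toList ≠ []) (hsp : ∀ c ∈ word.toList, c ≠ ' ') :
    (if PySem.Str.len word = 1 then output ++ [word]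
     else
      match PySem.Str.pyGet? word 0, PySem.Str.pyGet? word (-1) with
      | some first, some wordEnd =>
        output ++ [String.ofList ((PySem.Str.slice word (some 1) (some (-1))).toList.foldl
          (fun acc c => if (['a','e','i','o','u'] : List Char).contains c then acc else acc ++ [c]) [first] ++ [wordEnd])]
      | _, _ => output) =
    output ++ [String.ofList (goB ' ' word.toList)] := by
  obtain ⟨a, rest, hw⟩ : ∃ a rest, word.toList = a :: rest := by
    cases h : word.toList with
    | nil => exact absurd h hne
    | cons x xs => exact ⟨x, xs, rfl⟩
  have ha : a ≠ ' ' := hsp a (by simp [hw])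
  rcases rest.eq_nil_or_concat with rfl | ⟨mid, z, rfl⟩
  · -- one-character word
    have hlen : PySem.Str.len word = 1 := by simp [PySem.Str.len_eq, hw]
    rw [if_pos hlen, hw]
    simp [goB, keepB, String.ofList_toList, ← hw]
  · -- word = a :: mid ++ [z]
    simp only [List.concat_eq_append] at hw
    have hz : z ≠ ' ' := hsp z (by simp [hw])
    have hmid : ∀ c ∈ mid, c ≠ ' ' := fun c hc => hsp c (by simp [hw, hc])
    have hlen : PySem.Str.len word = (mid.length : Int) + 2 := by
      simp [PySem.Str.len_eq, hw]; omega
    rw [if_neg (by omega)]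
    have h0 : PySem.Str.pyGet? word 0 = some a := by
      simp [PySem.List.pyGet?, PySem.List.pyIdx?, hw]
      rw [if_pos (by omega)]
      simp
    have h1 : PySem.Str.pyGet? word (-1) = some z := by
      simp [PySem.List.pyGet?, PySem.List.pyIdx?, hw]
    rw [h0, h1]
    dsimp only
    have hsl : (PySem.Str.slice word (some 1) (some (-1))).toList = mid := by
      simp [PySem.Str.toList_slice, hw, slice_one_neg_one]
    rw [hsl]
    have hfun : (fun (acc : List Char) c => if (['a','e','i','o','u'] : List Char).contains c then acc else acc ++ [c])
        = (fun acc c => if (!(['a','e','i','o','u'] : List Char).contains c) = true then acc ++ [(fun x => x) c] else acc) := by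
      funext acc c
      rcases Bool.eq_false_or_eq_true ((['a','e','i','o','u'] : List Char).contains c) with h | h <;> rw [h] <;> simp
    rw [hfun, PySem.List.foldl_append_if]
    -- the goB side
    have hgo : goB ' ' word.toList = a :: (mid.filter (fun c => !(("aeiou".toList).contains c)) ++ [z]) := by
      rw [hw]
      show (if keepB ' ' a ((mid ++ [z]).headD ' ') then [a] else []) ++ goB a (mid ++ [z]) = _
      rw [goB_interior mid z a hmid ha hz]
      simp [keepB]
    rw [hgo]
    have hlist : ("aeiou".toList : List Char) = ['a','e','i','o','u'] := by decide
    simp [hlist, List.map_id_fun']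
-- A's whole fold over the word list is a map of goB
lemma foldl_words (ws : List String) (acc : List String)
    (h : ∀ w ∈ ws, w.toList ≠ [] ∧ ∀ c ∈ w.toList, c ≠ ' ') :
    ws.foldl (fun output word =>
      if PySem.Str.len word = 1 then output ++ [word]
      else
        match PySem.Str.pyGet? word 0, PySem.Str.pyGet? word (-1) with
        | some first, some wordEnd =>
          output ++ [String.ofList ((PySem.Str.slice word (some 1) (some (-1))).toList.foldl
            (fun acc c => if (['a','e','i','o','u'] : List Char).contains c then acc else acc ++ [c]) [first] ++ [wordEnd])]
        | _, _ => output) acc =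
    acc ++ ws.map (fun word => String.ofList (goB ' ' word.toList)) := by
  induction ws generalizing acc with
  | nil => simp
  | cons w ws ih =>
    simp only [List.foldl_cons, List.map_cons]
    rw [step_append acc w (h w List.mem_cons_self).1 (h w List.mem_cons_self).2]
    rw [ih _ (fun v hv => h v (List.mem_cons_of_mem w hv))]
    simp

theorem remove_aeiou_eq_alt (s : String) : remove_aeiou s = remove_aeiou_alt s := by
  unfold remove_aeiou remove_aeiou_alt
  dsimp only
  rw [zip_eq_goB]
  rw [foldl_words (PySem.Str.split₀ s) [] (fun w hw => split0_words_good s w hw)]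
  rw [PySem.Str.toList_join]
  have hsep : (" " : String).toList = [' '] := by decide
  rw [hsep]
  show PySem.Str.join " " _ = _
  have hwords : ∀ w ∈ (PySem.Str.split₀ s).map String.toList, ∀ c ∈ w, c ≠ ' ' := by
    intro w hw
    rcases List.mem_map.mp hw with ⟨v, hv, rfl⟩
    exact (split0_words_good s v hv).2
  rw [show PySem.Chars.join = fun (sep : List Char) parts => sep.intercalate parts from rfl]
  dsimp only
  rw [goB_intercalate _ hwords]
  -- both sides are ofList of the same list
  have : (PySem.Str.join " " ((PySem.Str.split₀ s).map (fun word => String.ofList (goB ' ' word.toList)))).toList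
      = List.intercalate [' '] (((PySem.Str.split₀ s).map String.toList).map (goB ' ')) := by
    rw [PySem.Str.toList_join, hsep]
    rw [show PySem.Chars.join = fun (sep : List Char) parts => sep.intercalate parts from rfl]
    dsimp only
    congr 1
    simp only [List.map_map]
    simp [Function.comp_def]
  calc PySem.Str.join " " ((PySem.Str.split₀ s).map (fun word => String.ofList (goB ' ' word.toList)))
      = String.ofList (PySem.Str.join " " ((PySem.Str.split₀ s).map (fun word => String.ofList (goB ' ' word.toList)))).toList := by
        rw [String.ofList_toList]
    _ = _ := by rw [this]

-- ===== VERDICT (by name: the statement is the Claim_ definition above) =====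
theorem remove_aeiou_spec : Claim_equal_remove_aeiou := by
  intro s _
  unfold Spec_remove_aeiou
  exact remove_aeiou_eq_alt s
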